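-- pv_equiv track=rewrite | github.com/Kim-Jaehyun0328/codingTest | programmers/level1/체육복.py | solution
-- ===== SOURCE A (Python) =====
-- def solution(n, lost, reserve):
--     lost.sort()
--     reserve.sort()
--
--     for x in reserve[:]:
--         if x in lost:
--             reserve.remove(x)
--             lost.remove(x)
--
--     for x in reserve:
--         if x - 1 in lost:
--             lost.remove(x - 1)
--         elif x + 1 in lost:
--             lost.remove(x + 1)
--
--     return n - len(lost)
-- ===== SOURCE B (Python) =====
-- def solution(n, lost, reserve):
--     # Return-value equivalent to A (A also sorts lost/reserve in place; B does not mutate).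
--     ls = sorted(lost)
--     rs = sorted(reserve)
--     # merge pass: cancel the common multiset (students who lost but have a spare)
--     l2, r2 = [], []
--     i = j = 0
--     while i < len(ls) and j < len(rs):
--         if ls[i] < rs[j]:
--             l2.append(ls[i]); i += 1
--         elif rs[j] < ls[i]:
--             r2.append(rs[j]); j += 1
--         else:
--             i += 1; j += 1
--     l2.extend(ls[i:])
--     r2.extend(rs[j:])
--     # two-pointer greedy: reserve ascending, lend to x-1 first, else x+1
--     matched = 0
--     i = 0
--     for x in r2:
--         while i < len(l2) and l2[i] < x - 1:
--             i += 1
--         if i < len(l2) and (l2[i] == x - 1 or l2[i] == x + 1):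
--             matched += 1
--             i += 1
--     return n - len(l2) + matched
-- ===== Notes on version B (the rewrite author's own statement) =====
-- stated objective: faster
-- what changed: Replaces A's repeated O(n) membership tests and list.remove calls with a single merge pass over the two sorted lists to cancel common elements, followed by a two-pointer greedy over the sorted leftovers, counting matches instead of deleting from a list; equivalence is about the return value only (A also sorts lost/reserve in place, B does not mutate).
import Mathlib
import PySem

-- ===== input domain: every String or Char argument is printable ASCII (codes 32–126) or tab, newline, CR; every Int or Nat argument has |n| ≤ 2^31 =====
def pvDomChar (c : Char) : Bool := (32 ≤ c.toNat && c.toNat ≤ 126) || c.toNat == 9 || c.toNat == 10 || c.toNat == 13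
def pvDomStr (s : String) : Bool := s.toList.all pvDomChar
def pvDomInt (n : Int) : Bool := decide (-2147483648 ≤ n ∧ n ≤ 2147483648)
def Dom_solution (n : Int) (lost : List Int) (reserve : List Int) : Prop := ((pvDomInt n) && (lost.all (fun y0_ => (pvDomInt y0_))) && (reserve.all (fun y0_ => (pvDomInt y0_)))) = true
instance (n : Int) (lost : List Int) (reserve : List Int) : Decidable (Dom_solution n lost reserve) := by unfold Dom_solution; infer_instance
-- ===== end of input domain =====

-- B replaces A's repeated linear membership tests and list.remove calls by one merge pass
-- (cancel common elements of the two sorted lists) plus a two-pointer greedy that counts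
-- matches; equivalence is about the RETURN value only (A sorts lost/reserve in place, B does not mutate).

-- ===== PORT A =====
-- for x in reserve[:]: if x in lost: reserve.remove(x); lost.remove(x)
-- state = (reserve, lost); remove? is some here whenever Python's remove succeeds (x was just
-- found in the list), so .getD is only a totalizer, never a semantic default.
def stepCancelA (st : List Int × List Int) (x : Int) : List Int × List Int :=
  if x ∈ st.2 then ((PySem.List.remove? st.1 x).getD st.1, (PySem.List.remove? st.2 x).getD st.2)
  else st

-- for x in reserve: if x-1 in lost: lost.remove(x-1) elif x+1 in lost: lost.remove(x+1)
def stepLendA (l : List Int) (x : Int) : List Int :=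
  if (x - 1) ∈ l then (PySem.List.remove? l (x - 1)).getD l
  else if (x + 1) ∈ l then (PySem.List.remove? l (x + 1)).getD l
  else l

def solution (n : Int) (lost : List Int) (reserve : List Int) : Int :=
  let ls := PySem.List.sorted lost (fun v => v)
  let rs := PySem.List.sorted reserve (fun v => v)
  let st := rs.foldl stepCancelA (rs, ls)          -- iterate over the copy reserve[:]
  let lost2 := st.1.foldl stepLendA st.2
  n - lost2.length

-- ===== PORT B =====
-- the merge `while i < len(ls) and j < len(rs): …` with trailing extends, as index recursion
def cancelGo (ls rs : List Int) (i j : Nat) (l2 r2 : List Int) : List Int × List Int :=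
  if hi : i < ls.length then
    if hj : j < rs.length then
      if ls[i] < rs[j] then cancelGo ls rs (i + 1) j (l2 ++ [ls[i]]) r2
      else if rs[j] < ls[i] then cancelGo ls rs i (j + 1) l2 (r2 ++ [rs[j]])
      else cancelGo ls rs (i + 1) (j + 1) l2 r2
    else (l2 ++ ls.drop i, r2 ++ rs.drop j)
  else (l2 ++ ls.drop i, r2 ++ rs.drop j)
termination_by (ls.length - i) + (rs.length - j)

-- the inner `while i < len(l2) and l2[i] < x - 1: i += 1`
def skipIdx (l2 : List Int) (x : Int) (i : Nat) : Nat :=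
  if h : i < l2.length then
    if l2[i] < x - 1 then skipIdx l2 x (i + 1) else i
  else i
termination_by l2.length - i

-- body of `for x in r2:` with state (i, matched)
def stepLendB (l2 : List Int) (st : Nat × Int) (x : Int) : Nat × Int :=
  let i := skipIdx l2 x st.1
  if h : i < l2.length then
    if l2[i] = x - 1 ∨ l2[i] = x + 1 then (i + 1, st.2 + 1) else (i, st.2)
  else (i, st.2)

def solution_alt (n : Int) (lost : List Int) (reserve : List Int) : Int :=
  let ls := PySem.List.sorted lost (fun v => v)
  let rs := PySem.List.sorted reserve (fun v => v)
  let p := cancelGo ls rs 0 0 [] []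
  let fin := p.2.foldl (stepLendB p.1) (0, 0)
  n - p.1.length + fin.2

-- ===== PRECONDITION & SPEC =====
def Spec_solution (n : Int) (lost : List Int) (reserve : List Int) (out : Int) : Prop := out = solution_alt n lost reserve
instance (n : Int) (lost : List Int) (reserve : List Int) (out : Int) : Decidable (Spec_solution n lost reserve out) := by unfold Spec_solution; infer_instance

-- ===== CLAIM (what is proved, stated in full; the proofs are below) =====
def Claim_equal_solution : Prop := ∀ (n : Int) (lost : List Int) (reserve : List Int), Dom_solution n lost reserve → Spec_solution n lost reserve (solution n lost reserve)

-- ===== LEMMAS AND PROOFS =====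

-- A clean recursive form of the merge-cancel pass, for reasoning.
def canc : List Int → List Int → List Int × List Int
  | [], rs => ([], rs)
  | l :: ls, [] => (l :: ls, [])
  | l :: ls, r :: rs =>
    if l < r then ((canc ls (r :: rs)).1.cons l, (canc ls (r :: rs)).2)
    else if r < l then ((canc (l :: ls) rs).1, (canc (l :: ls) rs).2.cons r)
    else canc ls rs
termination_by ls rs => ls.length + rs.length

lemma cancelGo_eq_canc (ls rs : List Int) : ∀ i j l2 r2,
    cancelGo ls rs i j l2 r2 =
      (l2 ++ (canc (ls.drop i) (rs.drop j)).1, r2 ++ (canc (ls.drop i) (rs.drop j)).2) := by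
  intro i j
  induction hn : (ls.length - i) + (rs.length - j) using Nat.strong_induction_on generalizing i j with
  | _ n ih =>
  intro l2 r2
  rw [cancelGo]
  by_cases hi : i < ls.length
  · simp only [dif_pos hi]
    by_cases hj : j < rs.length
    · simp only [dif_pos hj]
      have hdl := List.drop_eq_getElem_cons hi
      have hdr := List.drop_eq_getElem_cons hj
      by_cases h1 : ls[i] < rs[j]
      · rw [if_pos h1, ih _ (by omega) (i+1) j rfl]
        rw [hdl, hdr, canc]
        simp only [← hdr, if_pos h1, List.append_assoc, List.singleton_append]
      · rw [if_neg h1]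
        by_cases h2 : rs[j] < ls[i]
        · rw [if_pos h2, ih _ (by omega) i (j+1) rfl]
          conv_rhs => rw [hdl, hdr, canc]
          simp only [← hdl, if_neg h1, if_pos h2, List.append_assoc, List.singleton_append]
        · rw [if_neg h2, ih _ (by omega) (i+1) (j+1) rfl]
          conv_rhs => rw [hdl, hdr, canc]
          simp only [if_neg h1, if_neg h2]
    · simp only [dif_neg hj]
      have hdr0 : rs.drop j = [] := List.drop_of_length_le (by omega)
      rw [hdr0, List.drop_eq_getElem_cons hi, canc]
  · simp only [dif_neg hi]
    have hdl0 : ls.drop i = [] := List.drop_of_length_le (by omega)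
    rw [hdl0]
    simp [canc]

lemma canc_mem_fst {ls rs : List Int} {v : Int} : v ∈ (canc ls rs).1 → v ∈ ls := by
  fun_induction canc ls rs with
  | case1 => simp
  | case2 => simp
  | case3 l ls r rs h ih =>
    intro hv
    rcases List.mem_cons.mp hv with h' | h'
    · simp [h']
    · exact List.mem_cons_of_mem _ (ih h')
  | case4 l ls r rs h h2 ih => exact ih
  | case5 l ls r rs h h2 ih => intro hv; exact List.mem_cons_of_mem _ (ih hv)
lemma canc_mem_snd {ls rs : List Int} {v : Int} : v ∈ (canc ls rs).2 → v ∈ rs := by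
  fun_induction canc ls rs with
  | case1 => simp
  | case2 => simp
  | case3 l ls r rs h ih => exact ih
  | case4 l ls r rs h h2 ih =>
    intro hv
    rcases List.mem_cons.mp hv with h' | h'
    · simp [h']
    · exact List.mem_cons_of_mem _ (ih h')
  | case5 l ls r rs h h2 ih => intro hv; exact List.mem_cons_of_mem _ (ih hv)

lemma canc_pairwise (ls rs : List Int) (hl : ls.Pairwise (· ≤ ·)) (hr : rs.Pairwise (· ≤ ·)) :
    (canc ls rs).1.Pairwise (· ≤ ·) ∧ (canc ls rs).2.Pairwise (· ≤ ·) := by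
  fun_induction canc ls rs with
  | case1 rs => exact ⟨List.Pairwise.nil, hr⟩
  | case2 l ls => exact ⟨hl, List.Pairwise.nil⟩
  | case3 l ls r rs h ih =>
    obtain ⟨ih1, ih2⟩ := ih (List.Pairwise.of_cons hl) hr
    refine ⟨List.Pairwise.cons ?_ ih1, ih2⟩
    intro a ha
    exact (List.pairwise_cons.mp hl).1 a (canc_mem_fst ha)
  | case4 l ls r rs h h2 ih =>
    obtain ⟨ih1, ih2⟩ := ih hl (List.Pairwise.of_cons hr)
    refine ⟨ih1, List.Pairwise.cons ?_ ih2⟩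
    intro a ha
    exact (List.pairwise_cons.mp hr).1 a (canc_mem_snd ha)
  | case5 l ls r rs h h2 ih =>
    exact ih (List.Pairwise.of_cons hl) (List.Pairwise.of_cons hr)

lemma canc_count (ls rs : List Int) (hl : ls.Pairwise (· ≤ ·)) (hr : rs.Pairwise (· ≤ ·)) (v : Int) :
    List.count v (canc ls rs).1 = List.count v ls - min (List.count v ls) (List.count v rs)
    ∧ List.count v (canc ls rs).2 = List.count v rs - min (List.count v ls) (List.count v rs) := by
  fun_induction canc ls rs with
  | case1 rs => simp
  | case2 l ls => simp
  | case3 l ls r rs h ih =>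
    obtain ⟨ih1, ih2⟩ := ih (List.Pairwise.of_cons hl) hr
    dsimp only
    by_cases hv : v = l
    · subst hv
      have hzero : List.count v (r :: rs) = 0 := by
        rw [List.count_eq_zero]
        intro hmem
        have : r ≤ v := by
          rcases List.mem_cons.mp hmem with h' | h'
          · omega
          · exact (List.pairwise_cons.mp hr).1 v h'
        omega
      rw [hzero] at ih1 ih2 ⊢
      constructor
      · rw [List.count_cons_self, List.count_cons_self]
        omega
      · omega
    · rw [List.count_cons_of_ne (Ne.symm hv), List.count_cons_of_ne (Ne.symm hv)]
      exact ⟨ih1, ih2⟩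
  | case4 l ls r rs h h2 ih =>
    obtain ⟨ih1, ih2⟩ := ih hl (List.Pairwise.of_cons hr)
    dsimp only
    by_cases hv : v = r
    · subst hv
      have hzero : List.count v (l :: ls) = 0 := by
        rw [List.count_eq_zero]
        intro hmem
        have : l ≤ v := by
          rcases List.mem_cons.mp hmem with h' | h'
          · omega
          · exact (List.pairwise_cons.mp hl).1 v h'
        omega
      rw [hzero] at ih1 ih2 ⊢
      constructor
      · omega
      · rw [List.count_cons_self, List.count_cons_self]
        omega
    · rw [List.count_cons_of_ne (Ne.symm hv), List.count_cons_of_ne (Ne.symm hv)]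
      exact ⟨ih1, ih2⟩
  | case5 l ls r rs h h2 ih =>
    have heq : l = r := by omega
    subst heq
    obtain ⟨ih1, ih2⟩ := ih (List.Pairwise.of_cons hl) (List.Pairwise.of_cons hr)
    by_cases hv : v = l
    · subst hv
      rw [List.count_cons_self, List.count_cons_self]
      omega
    · rw [List.count_cons_of_ne (Ne.symm hv), List.count_cons_of_ne (Ne.symm hv)]
      exact ⟨ih1, ih2⟩

lemma stepCancelA_eq (st : List Int × List Int) (x : Int) :
    stepCancelA st x = if x ∈ st.2 then (st.1.erase x, st.2.erase x) else st := by
  unfold stepCancelA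
  split_ifs with h
  · rw [PySem.List.remove?_eq_some_erase st.2 x h, Option.getD_some]
    by_cases h1 : x ∈ st.1
    · rw [PySem.List.remove?_eq_some_erase st.1 x h1, Option.getD_some]
    · rw [(PySem.List.remove?_eq_none_iff st.1 x).mpr h1, Option.getD_none,
        List.erase_of_not_mem h1]
  · rfl

lemma phase1_count (xs : List Int) : ∀ (res lost : List Int) (v : Int),
    List.count v (xs.foldl stepCancelA (res, lost)).1
      = List.count v res - min (List.count v xs) (List.count v lost)
    ∧ List.count v (xs.foldl stepCancelA (res, lost)).2
      = List.count v lost - min (List.count v xs) (List.count v lost) := by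
  induction xs with
  | nil => intro res lost v; simp
  | cons x xs ih =>
    intro res lost v
    simp only [List.foldl_cons, stepCancelA_eq]
    by_cases hx : x ∈ lost
    · simp only [if_pos hx]
      obtain ⟨ih1, ih2⟩ := ih (res.erase x) (lost.erase x) v
      have hxl : 1 ≤ List.count x lost := List.count_pos_iff.mpr hx
      by_cases hv : x = v
      · subst hv
        simp at ih1 ih2
        rw [List.count_cons_self]
        omega
      · simp only [List.count_erase, beq_iff_eq, if_neg hv, Nat.sub_zero] at ih1 ih2
        rw [List.count_cons_of_ne hv]
        omega
    · simp only [if_neg hx]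
      obtain ⟨ih1, ih2⟩ := ih res lost v
      have hc0 : List.count x lost = 0 := List.count_eq_zero.mpr hx
      by_cases hv : x = v
      · subst hv
        rw [List.count_cons_self]
        omega
      · rw [List.count_cons_of_ne hv]
        omega

lemma phase1_pairwise (xs : List Int) : ∀ (res lost : List Int),
    res.Pairwise (· ≤ ·) → lost.Pairwise (· ≤ ·) →
    (xs.foldl stepCancelA (res, lost)).1.Pairwise (· ≤ ·)
    ∧ (xs.foldl stepCancelA (res, lost)).2.Pairwise (· ≤ ·) := by
  induction xs with
  | nil => intro res lost h1 h2; exact ⟨h1, h2⟩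
  | cons x xs ih =>
    intro res lost h1 h2
    simp only [List.foldl_cons, stepCancelA_eq]
    by_cases hx : x ∈ lost
    · simp only [if_pos hx]
      exact ih _ _ (List.Pairwise.sublist List.erase_sublist h1) (List.Pairwise.sublist List.erase_sublist h2)
    · simp only [if_neg hx]
      exact ih _ _ h1 h2

-- properties of the skip loop
lemma skipIdx_spec (l2 : List Int) (x : Int) : ∀ i, i ≤ l2.length →
    ∃ T : List Int,
      l2.drop i = T ++ l2.drop (skipIdx l2 x i)
      ∧ (∀ a ∈ T, a < x - 1)
      ∧ i ≤ skipIdx l2 x i ∧ skipIdx l2 x i ≤ l2.length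
      ∧ (∀ h : skipIdx l2 x i < l2.length, ¬ l2[skipIdx l2 x i] < x - 1)
      ∧ T.length = skipIdx l2 x i - i := by
  intro i
  induction hn : l2.length - i using Nat.strong_induction_on generalizing i with
  | _ n ihn =>
  intro hi
  rw [skipIdx]
  by_cases h : i < l2.length
  · simp only [dif_pos h]
    by_cases hlt : l2[i] < x - 1
    · simp only [if_pos hlt]
      obtain ⟨T, hT1, hT2, hT3, hT4, hT5, hT6⟩ := ihn (l2.length - (i+1)) (by omega) (i+1) rfl (by omega)
      refine ⟨l2[i] :: T, ?_, ?_, by omega, hT4, hT5, by simp; omega⟩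
      · rw [List.drop_eq_getElem_cons h, hT1, List.cons_append]
      · intro a ha
        rcases List.mem_cons.mp ha with h' | h'
        · omega
        · exact hT2 a h'
    · simp only [if_neg hlt]
      exact ⟨[], by simp, by simp, le_refl i, hi, fun _ => hlt, by simp⟩
  · simp only [dif_neg h]
    exact ⟨[], by simp, by simp, le_refl i, hi, fun hh => absurd hh h, by simp⟩

-- phase-2 of A: each step is an erase (or a no-op)
lemma stepLendA_eq (l : List Int) (x : Int) :
    stepLendA l x = if (x - 1) ∈ l then l.erase (x - 1)
      else if (x + 1) ∈ l then l.erase (x + 1) else l := by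
  unfold stepLendA
  split_ifs with h1 h2
  · rw [PySem.List.remove?_eq_some_erase l _ h1, Option.getD_some]
  · rw [PySem.List.remove?_eq_some_erase l _ h2, Option.getD_some]
  · rfl

-- the main phase-2 invariant
lemma phase2_inv (l2 : List Int) (hl2 : l2.Pairwise (· ≤ ·)) :
    ∀ (r2 : List Int), r2.Pairwise (· ≤ ·) → (∀ x ∈ r2, x ∉ l2) →
    ∀ (S : List Int) (i : Nat) (m : Int), i ≤ l2.length →
    (∀ a ∈ S, ∀ x ∈ r2, a < x - 1) →
    ((r2.foldl stepLendA (S ++ l2.drop i)).length : Int) + (r2.foldl (stepLendB l2) (i, m)).2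
      = (S.length : Int) + ((l2.length : Int) - i) + m := by
  intro r2
  induction r2 with
  | nil =>
    intro _ _ S i m hi _
    simp only [List.foldl_nil, List.length_append, List.length_drop]
    push_cast [Nat.cast_sub hi]
    ring
  | cons x r2 ih =>
    intro hr2 hdisj S i m hi hS
    obtain ⟨hx_le, hr2'⟩ := List.pairwise_cons.mp hr2
    obtain ⟨T, hT_eq, hT_lt, hii, hlen, hstop, hTlen⟩ := skipIdx_spec l2 x i hi
    simp only [List.foldl_cons]
    set i' := skipIdx l2 x i with hi'def
    have hstate : S ++ l2.drop i = (S ++ T) ++ l2.drop i' := by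
      rw [hT_eq, List.append_assoc]
    have hSTlt : ∀ a ∈ S ++ T, a < x - 1 := by
      intro a ha
      rcases List.mem_append.mp ha with h' | h'
      · exact hS a h' x (List.mem_cons_self ..)
      · exact hT_lt a h'
    have hST_not1 : (x - 1) ∉ S ++ T := by
      intro hmem; have := hSTlt _ hmem; omega
    have hST_not2 : (x + 1) ∉ S ++ T := by
      intro hmem; have := hSTlt _ hmem; omega
    have hS' : ∀ a ∈ S ++ T, ∀ y ∈ r2, a < y - 1 := by
      intro a ha y hy
      have h1 := hSTlt a ha
      have h2 := hx_le y hy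
      omega
    have hdisj' : ∀ y ∈ r2, y ∉ l2 := fun y hy => hdisj y (List.mem_cons_of_mem x hy)
    have hB : stepLendB l2 (i, m) x = (if _h : i' < l2.length then
        (if l2[i']'(by omega) = x - 1 ∨ l2[i']'(by omega) = x + 1 then (i' + 1, m + 1)
         else (i', m)) else (i', m)) := rfl
    rw [hstate, hB]
    by_cases hlt : i' < l2.length
    · have hdropc : l2.drop i' = l2[i'] :: l2.drop (i' + 1) := List.drop_eq_getElem_cons hlt
      have hge : x - 1 ≤ l2[i'] := by have := hstop hlt; omega
      have hrest_ge : ∀ y ∈ l2.drop (i' + 1), l2[i'] ≤ y := by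
        have hpw := hl2.drop (i := i')
        rw [hdropc] at hpw
        exact (List.pairwise_cons.mp hpw).1
      have hmem_iff : ∀ v : Int, v ≤ l2[i'] → ((v ∈ l2.drop i') ↔ l2[i'] = v) := by
        intro v hv
        constructor
        · intro hm
          rw [hdropc] at hm
          rcases List.mem_cons.mp hm with h' | h'
          · omega
          · have := hrest_ge v h'; omega
        · intro he; rw [hdropc, he]; exact List.mem_cons_self ..
      have hne_x : l2[i'] ≠ x := by
        intro hh
        exact hdisj x (List.mem_cons_self ..) (hh ▸ List.getElem_mem hlt)
      rw [dif_pos hlt]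
      by_cases hx1 : l2[i'] = x - 1
      · have hmem : (x - 1) ∈ (S ++ T) ++ l2.drop i' :=
          List.mem_append.mpr (Or.inr ((hmem_iff _ (by omega)).mpr hx1))
        have hAstep : stepLendA ((S ++ T) ++ l2.drop i') x = (S ++ T) ++ l2.drop (i' + 1) := by
          rw [stepLendA_eq, if_pos hmem, List.erase_append_right _ hST_not1, hdropc, hx1,
            List.erase_cons_head]
        rw [hAstep, if_pos (Or.inl hx1)]
        have hrec := ih hr2' hdisj' (S ++ T) (i' + 1) (m + 1) hlt hS'
        simp only [List.length_append] at hrec ⊢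
        omega
      · have hnm1 : (x - 1) ∉ (S ++ T) ++ l2.drop i' := by
          intro hm
          rcases List.mem_append.mp hm with h' | h'
          · exact hST_not1 h'
          · exact hx1 ((hmem_iff _ (by omega)).mp h')
        by_cases hx2 : l2[i'] = x + 1
        · have hmem : (x + 1) ∈ (S ++ T) ++ l2.drop i' :=
            List.mem_append.mpr (Or.inr ((hmem_iff _ (by omega)).mpr hx2))
          have hAstep : stepLendA ((S ++ T) ++ l2.drop i') x = (S ++ T) ++ l2.drop (i' + 1) := by
            rw [stepLendA_eq, if_neg hnm1, if_pos hmem, List.erase_append_right _ hST_not2,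
              hdropc, hx2, List.erase_cons_head]
          rw [hAstep, if_pos (Or.inr hx2)]
          have hrec := ih hr2' hdisj' (S ++ T) (i' + 1) (m + 1) hlt hS'
          simp only [List.length_append] at hrec ⊢
          omega
        · have hbig : x + 1 < l2[i'] := by omega
          have hnm2 : (x + 1) ∉ (S ++ T) ++ l2.drop i' := by
            intro hm
            rcases List.mem_append.mp hm with h' | h'
            · exact hST_not2 h'
            · exact hx2 ((hmem_iff _ (by omega)).mp h')
          have hAstep : stepLendA ((S ++ T) ++ l2.drop i') x = (S ++ T) ++ l2.drop i' := by
            rw [stepLendA_eq, if_neg hnm1, if_neg hnm2]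
          rw [hAstep, if_neg (fun hc => hc.elim hx1 hx2)]
          have hrec := ih hr2' hdisj' (S ++ T) i' m (by omega) hS'
          simp only [List.length_append] at hrec ⊢
          omega
    · have hdrop0 : l2.drop i' = ([] : List Int) := List.drop_of_length_le (by omega)
      have hnm1 : (x - 1) ∉ (S ++ T) ++ l2.drop i' := by
        rw [hdrop0, List.append_nil]; exact hST_not1
      have hnm2 : (x + 1) ∉ (S ++ T) ++ l2.drop i' := by
        rw [hdrop0, List.append_nil]; exact hST_not2
      have hAstep : stepLendA ((S ++ T) ++ l2.drop i') x = (S ++ T) ++ l2.drop i' := by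
        rw [stepLendA_eq, if_neg hnm1, if_neg hnm2]
      rw [hAstep, dif_neg hlt]
      have hrec := ih hr2' hdisj' (S ++ T) i' m (by omega) hS'
      simp only [List.length_append] at hrec ⊢
      omega

-- ===== VERDICT (by name: the statement is the Claim_ definition above) =====
-- assembling: phase 1 of A equals the merge-cancel pass (same counts, both sorted)
lemma phase1_eq_canc (ls rs : List Int) (hl : ls.Pairwise (· ≤ ·)) (hr : rs.Pairwise (· ≤ ·)) :
    (rs.foldl stepCancelA (rs, ls)).1 = (canc ls rs).2
    ∧ (rs.foldl stepCancelA (rs, ls)).2 = (canc ls rs).1 := by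
  have hpw := phase1_pairwise rs rs ls hr hl
  have hcpw := canc_pairwise ls rs hl hr
  have hanti : ∀ a b : Int, a ≤ b → b ≤ a → a = b := fun a b h1 h2 => le_antisymm h1 h2
  constructor
  · refine List.Perm.eq_of_pairwise (fun a b _ _ => hanti a b) hpw.1 hcpw.2 ?_
    rw [List.perm_iff_count]
    intro v
    have h1 := (phase1_count rs rs ls v).1
    have h2 := (canc_count ls rs hl hr v).2
    omega
  · refine List.Perm.eq_of_pairwise (fun a b _ _ => hanti a b) hpw.2 hcpw.1 ?_
    rw [List.perm_iff_count]
    intro v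
    have h1 := (phase1_count rs rs ls v).2
    have h2 := (canc_count ls rs hl hr v).1
    omega

lemma canc_disjoint (ls rs : List Int) (hl : ls.Pairwise (· ≤ ·)) (hr : rs.Pairwise (· ≤ ·)) :
    ∀ x ∈ (canc ls rs).2, x ∉ (canc ls rs).1 := by
  intro x hx hmem
  have h1 := (canc_count ls rs hl hr x).1
  have h2 := (canc_count ls rs hl hr x).2
  have p1 : 0 < List.count x (canc ls rs).1 := List.count_pos_iff.mpr hmem
  have p2 : 0 < List.count x (canc ls rs).2 := List.count_pos_iff.mpr hx
  omega

-- ===== VERDICT (by name: the statement is the Claim_ definition above) =====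
theorem solution_spec : Claim_equal_solution := by
  intro n lost reserve _
  unfold Spec_solution solution solution_alt
  dsimp only
  have hls : (PySem.List.sorted lost (fun v => v)).Pairwise (· ≤ ·) :=
    PySem.List.sorted_pairwise lost (fun v => v)
  have hrs : (PySem.List.sorted reserve (fun v => v)).Pairwise (· ≤ ·) :=
    PySem.List.sorted_pairwise reserve (fun v => v)
  set ls := PySem.List.sorted lost (fun v => v)
  set rs := PySem.List.sorted reserve (fun v => v)
  have hcanc := cancelGo_eq_canc ls rs 0 0 [] []
  simp only [List.drop_zero, List.nil_append] at hcanc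
  obtain ⟨hfst, hsnd⟩ := phase1_eq_canc ls rs hls hrs
  rw [hcanc, hfst, hsnd]
  dsimp only
  have hcpw := canc_pairwise ls rs hls hrs
  have hinv := phase2_inv (canc ls rs).1 hcpw.1 (canc ls rs).2 hcpw.2
    (canc_disjoint ls rs hls hrs) [] 0 0 (Nat.zero_le _)
    (by intro a ha; cases ha)
  simp only [List.nil_append, List.drop_zero, List.length_nil, Nat.cast_zero] at hinv
  omega
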